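-- pv_equiv track=rewrite | github.com/Amborsia/BaekjoonHub | 프로그래머스/2/131127. 할인 행사/할인 행사.py | solution
-- ===== SOURCE A (Python) =====
-- def solution(want, number, discount):
--     dict = {product: quantity for product, quantity in zip(want, number)}
--     date = 0
--
--     for i in range(len(discount)-9):
--         current = {}
--         for day in range(i, i+10):
--             product = discount[day]
--             if product in current:
--                 current[product]+=1
--             else:
--                 current[product]=1
--
--         matches = True
--         for product, quantity in dict.items():
--             if current.get(product,0) <quantity:
--                 matches = False
--                 break
--         if matches:
--             date+=1
--     return date
-- ===== SOURCE B (Python) =====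
-- def solution(want, number, discount):
--     n = len(discount)
--     if n < 10:
--         return 0
--     need = dict(zip(want, number))
--     target = len(need)
--     cnt = {}
--     satisfied = sum(1 for q in need.values() if q <= 0)
--
--     def add(p):
--         nonlocal satisfied
--         c = cnt.get(p, 0) + 1
--         cnt[p] = c
--         q = need.get(p)
--         if q is not None and c == q and q > 0:
--             satisfied += 1
--
--     def rem(p):
--         nonlocal satisfied
--         c = cnt.get(p, 0)
--         q = need.get(p)
--         if q is not None and c == q and q > 0:
--             satisfied -= 1
--         cnt[p] = c - 1
--
--     for p in discount[:10]:
--         add(p)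
--     date = 1 if satisfied == target else 0
--     for new, old in zip(discount[10:], discount):
--         add(new)
--         rem(old)
--         if satisfied == target:
--             date += 1
--     return date
-- ===== Notes on version B (the rewrite author's own statement) =====
-- stated objective: faster
-- what changed: Replaces the rebuild-a-counter-per-window O(n*(10+|want|)) scan with a sliding window that updates one counter incrementally and tracks the number of satisfied products, so each day is processed in O(1).
import Mathlib
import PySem

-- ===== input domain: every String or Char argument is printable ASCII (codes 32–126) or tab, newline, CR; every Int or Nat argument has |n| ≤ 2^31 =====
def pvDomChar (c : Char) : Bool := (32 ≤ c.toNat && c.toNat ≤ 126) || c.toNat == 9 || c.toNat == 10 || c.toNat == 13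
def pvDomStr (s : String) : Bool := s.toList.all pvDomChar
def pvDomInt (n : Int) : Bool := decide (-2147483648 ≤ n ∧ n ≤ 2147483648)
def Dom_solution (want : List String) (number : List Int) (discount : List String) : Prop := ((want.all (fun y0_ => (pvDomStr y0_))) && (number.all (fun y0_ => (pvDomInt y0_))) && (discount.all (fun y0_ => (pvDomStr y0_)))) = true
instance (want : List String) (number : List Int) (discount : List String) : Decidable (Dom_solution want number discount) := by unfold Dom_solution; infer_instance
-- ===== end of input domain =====

-- B replaces A's rebuild-a-counter-for-every-window scan by a sliding window that updates one
-- counter incrementally and tracks how many wanted products are currently satisfied (objective: faster).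

-- ===== PORT A =====
-- {product: quantity for product, quantity in zip(want, number)} — also what Source B's dict(zip(want, number)) builds
def pvNeed (want : List String) (number : List Int) : PySem.Dict String Int :=
  (want.zip number).foldl (fun d pq => d.insert pq.1 pq.2) PySem.Dict.empty

def solution (want : List String) (number : List Int) (discount : List String) : Int :=
  let d := pvNeed want number
  (PySem.List.pyRange 0 (PySem.List.len discount - 9) 1).foldl (fun date i =>
    let current := (PySem.List.pyRange i (i + 10) 1).foldl (fun cur day =>
      -- product = discount[day]; day is always in range inside this loop, so the total form pyGetD is exact here
      let product := PySem.List.pyGetD discount day ""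
      if cur.contains product then cur.insert product (cur.getD product 0 + 1)
      else cur.insert product 1) PySem.Dict.empty
    -- matches = True; for product, quantity in dict.items(): if current.get(product,0) < quantity: matches = False; break
    let ok := d.items.all (fun pq => !decide (current.getD pq.1 0 < pq.2))
    if ok then date + 1 else date) 0

-- ===== PORT B =====
-- Source B's add(p): bump cnt[p], and if that reaches exactly the (positive) wanted quantity, satisfied += 1
def pvAdd (need : PySem.Dict String Int) (st : PySem.Dict String Int × Int) (p : String) :
    PySem.Dict String Int × Int :=
  let c := st.1.getD p 0 + 1
  let cnt := st.1.insert p c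
  match need.get? p with
  | some q => if c = q ∧ 0 < q then (cnt, st.2 + 1) else (cnt, st.2)
  | none => (cnt, st.2)

-- Source B's rem(p): if cnt[p] currently equals the (positive) wanted quantity, satisfied -= 1; then drop cnt[p]
def pvRem (need : PySem.Dict String Int) (st : PySem.Dict String Int × Int) (p : String) :
    PySem.Dict String Int × Int :=
  let c := st.1.getD p 0
  let sat := match need.get? p with
    | some q => if c = q ∧ 0 < q then st.2 - 1 else st.2
    | none => st.2
  (st.1.insert p (c - 1), sat)

-- body of Source B's main loop: add(new); rem(old); if satisfied == target: date += 1
def pvStep (need : PySem.Dict String Int) (target : Int)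
    (st : (PySem.Dict String Int × Int) × Int) (pr : String × String) :
    (PySem.Dict String Int × Int) × Int :=
  let st1 := pvAdd need st.1 pr.1
  let st2 := pvRem need st1 pr.2
  (st2, if st2.2 = target then st.2 + 1 else st.2)

def solution_alt (want : List String) (number : List Int) (discount : List String) : Int :=
  let n := PySem.List.len discount
  if n < 10 then 0
  else
    let need := pvNeed want number
    let target : Int := PySem.Dict.size need
    -- satisfied = sum(1 for q in need.values() if q <= 0)
    let sat0 : Int := ((need.values.filter (fun q => decide (q ≤ 0))).length : Int)
    -- for p in discount[:10]: add(p)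
    let st0 := (PySem.List.slice discount none (some 10)).foldl (pvAdd need) (PySem.Dict.empty, sat0)
    let date0 : Int := if st0.2 = target then 1 else 0
    -- for new, old in zip(discount[10:], discount): …
    (((PySem.List.slice discount (some 10) none).zip discount).foldl (pvStep need target) (st0, date0)).2

-- ===== PRECONDITION & SPEC =====
def Spec_solution (want : List String) (number : List Int) (discount : List String) (out : Int) : Prop := out = solution_alt want number discount
instance (want : List String) (number : List Int) (discount : List String) (out : Int) : Decidable (Spec_solution want number discount out) := by unfold Spec_solution; infer_instance

-- ===== CLAIM (what is proved, stated in full; the proofs are below) =====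
def Claim_equal_solution : Prop := ∀ (want : List String) (number : List Int) (discount : List String), Dom_solution want number discount → Spec_solution want number discount (solution want number discount)

-- ===== LEMMAS AND PROOFS =====

-- number of wanted products whose quantity is met in the window w
def pvSatOf (need : PySem.Dict String Int) (w : List String) : Int :=
  (need.items.countP (fun pq => decide (pq.2 ≤ (w.count pq.1 : Int))) : Int)

-- the window w meets every wanted quantity
def pvGood (need : PySem.Dict String Int) (w : List String) : Bool :=
  need.items.all (fun pq => decide (pq.2 ≤ (w.count pq.1 : Int)))

-- number of good windows of v starting at positions 1, 2, …
def pvWins (need : PySem.Dict String Int) (v : List String) : Nat :=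
  (List.range (v.length - 10)).countP (fun j => pvGood need ((v.drop (j + 1)).take 10))

theorem pv_countP_add_one (g : String → Int) (p : String) :
    ∀ (l : List (String × Int)), (l.map Prod.fst).Nodup →
    l.countP (fun pq => decide (pq.2 ≤ g pq.1 + (if pq.1 = p then 1 else 0)))
      = l.countP (fun pq => decide (pq.2 ≤ g pq.1)) + (if (p, g p + 1) ∈ l then 1 else 0) := by
  intro l
  induction l with
  | nil => simp
  | cons hd t ih =>
    intro hnd
    simp only [List.map_cons, List.nodup_cons] at hnd
    obtain ⟨hni, hndt⟩ := hnd
    rw [List.countP_cons, List.countP_cons]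
    by_cases hk : hd.1 = p
    · -- head has key p; no key p in the tail
      have htail : ∀ pq ∈ t, ((decide (pq.2 ≤ g pq.1 + (if pq.1 = p then 1 else 0))) = true
          ↔ (decide (pq.2 ≤ g pq.1)) = true) := by
        intro pq hm
        have hne : pq.1 ≠ p := by
          intro h
          exact hni (by rw [hk, ← h]; exact List.mem_map_of_mem hm)
        simp [hne]
      have hnt : (p, g p + 1) ∉ t := by
        intro hm
        exact hni (by rw [hk]; exact (List.mem_map_of_mem (f := Prod.fst) hm : p ∈ _))
      by_cases hq : hd.2 = g p + 1
      · have hhd : hd = (p, g p + 1) := by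
          cases hd; simp_all
        simp only [hhd, List.mem_cons, hnt, or_false]
        rw [List.countP_congr htail]
        subst hhd
        simp
      · have hm : (p, g p + 1) ∉ hd :: t := by
          intro h
          rcases List.mem_cons.mp h with h | h
          · exact hq (congrArg Prod.snd h.symm)
          · exact hnt h
        rw [if_neg hm, List.countP_congr htail]
        have hq2 : hd.2 ≠ g p + 1 := hq
        have : (decide (hd.2 ≤ g hd.1 + (if hd.1 = p then 1 else 0))) = (decide (hd.2 ≤ g hd.1)) := by
          simp only [hk, decide_eq_decide]
          simp
          omega
        rw [this]
        simp
    · -- head key ≠ p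
      have hmem : ((p, g p + 1) ∈ hd :: t) ↔ ((p, g p + 1) ∈ t) := by
        constructor
        · intro h
          rcases List.mem_cons.mp h with h | h
          · exact absurd (by rw [← h]) hk
          · exact h
        · exact fun h => List.mem_cons_of_mem _ h
      rw [if_congr hmem rfl rfl] -- hmm
      rw [ih hndt]
      simp [hk]
      omega

lemma pv_currentA_getD (w : List String) (x : String) :
    ((w.foldl (fun cur product =>
        if cur.contains product then cur.insert product (cur.getD product 0 + 1)
        else cur.insert product 1) (PySem.Dict.empty : PySem.Dict String Int)).getD x 0)
      = (w.count x : Int) := by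
  rw [PySem.List.foldl_congr_mem w _ (fun cur p => cur.insert p (cur.getD p 0 + 1)) _ ?_]
  · rw [PySem.Dict.getD_foldl_insert_add_one, PySem.Dict.getD_empty, zero_add]
  · intro cur p _
    by_cases hc : cur.contains p = true
    · simp [hc]
    · simp only [Bool.not_eq_true] at hc
      simp only [hc, Bool.false_eq_true, if_false]
      rw [PySem.Dict.getD_of_not_contains cur 0 hc, zero_add]

-- countP with the window w ++ [p] is countP with the shifted g
lemma pv_satOf_append (need : PySem.Dict String Int) (w : List String) (p : String) :
    pvSatOf need (w ++ [p]) = (need.items.countP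
      (fun pq => decide (pq.2 ≤ (w.count pq.1 : Int) + (if pq.1 = p then 1 else 0))) : Int) := by
  unfold pvSatOf
  congr 1
  apply List.countP_congr
  intro pq _
  simp only [List.count_append, List.count_singleton]
  by_cases h : pq.1 = p
  · subst h; simp
  · have : ¬ (p = pq.1) := fun hh => h hh.symm
    simp [h, this]

lemma pv_bAdd (need : PySem.Dict String Int) (hnd : need.keys.Nodup)
    (cnt : PySem.Dict String Int) (sat : Int) (w : List String) (p : String)
    (hc : ∀ x, cnt.getD x 0 = (w.count x : Int)) (hs : sat = pvSatOf need w) :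
    (∀ x, (pvAdd need (cnt, sat) p).1.getD x 0 = ((w ++ [p]).count x : Int)) ∧
      (pvAdd need (cnt, sat) p).2 = pvSatOf need (w ++ [p]) := by
  have hndi : (need.items.map Prod.fst).Nodup := hnd
  have hcnt : ∀ x, (cnt.insert p (cnt.getD p 0 + 1)).getD x 0 = ((w ++ [p]).count x : Int) := by
    intro x
    rw [PySem.Dict.getD_insert]
    simp only [List.count_append, List.count_singleton]
    by_cases h : x = p
    · subst h; rw [if_pos rfl, hc]; simp
    · rw [if_neg h, hc]
      have : (p == x) = false := by simp [BEq.beq]; exact fun hh => h hh.symm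
      simp [this]
  have hkey := pv_countP_add_one (fun x => (w.count x : Int)) p need.items hndi
  have hsat : pvSatOf need (w ++ [p]) = pvSatOf need w
      + (if (p, (w.count p : Int) + 1) ∈ need.items then 1 else 0) := by
    rw [pv_satOf_append]
    unfold pvSatOf
    rw [hkey]
    push_cast
    split_ifs <;> simp
  constructor
  · intro x
    unfold pvAdd
    cases hg : need.get? p with
    | none => dsimp only; simpa using hcnt x
    | some q =>
      by_cases hif : cnt.getD p 0 + 1 = q ∧ 0 < q
      · dsimp only; rw [if_pos hif]; simpa using hcnt x
      · dsimp only; rw [if_neg hif]; simpa using hcnt x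
  · unfold pvAdd
    cases hg : need.get? p with
    | none =>
      have hnm : (p, (w.count p : Int) + 1) ∉ need.items := by
        intro hm
        have := PySem.Dict.mem_keys_of_mem_items need hm
        rw [(PySem.Dict.get?_eq_none_iff_not_mem_keys need p)] at hg
        exact hg this
      dsimp only
      rw [hsat, if_neg hnm, hs]
      simp
    | some q =>
      have hmq : (p, q) ∈ need.items := (PySem.Dict.get?_eq_some_iff_mem_items need p q hnd).mp hg
      by_cases hif : cnt.getD p 0 + 1 = q ∧ 0 < q
      · have : (p, (w.count p : Int) + 1) ∈ need.items := by
          have : q = (w.count p : Int) + 1 := by rw [← hif.1, hc]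
          rwa [← this]
        dsimp only
        rw [if_pos hif, hsat, if_pos this, hs]
      · have hnm : (p, (w.count p : Int) + 1) ∉ need.items := by
        -- if it were a member, get? p = some (count+1), so q = count+1; but then hif holds
          intro hm
          have h2 := PySem.Dict.get?_of_mem_items need hm hnd
          rw [hg] at h2
          have hq : q = (w.count p : Int) + 1 := by injection h2 with h3
          apply hif
          constructor
          · rw [hc]; omega
          · have h0 : (0:Int) ≤ (w.count p : Int) := Int.natCast_nonneg _
            omega
        dsimp only
        rw [if_neg hif, hsat, if_neg hnm, hs]
        simp

lemma pv_satOf_cons (need : PySem.Dict String Int) (w' : List String) (p : String) :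
    pvSatOf need (p :: w') = (need.items.countP
      (fun pq => decide (pq.2 ≤ (w'.count pq.1 : Int) + (if pq.1 = p then 1 else 0))) : Int) := by
  unfold pvSatOf
  congr 1
  apply List.countP_congr
  intro pq _
  simp only [List.count_cons]
  by_cases h : pq.1 = p
  · subst h; simp
  · have : ¬ (p = pq.1) := fun hh => h hh.symm
    simp [h, this]

lemma pv_bRem (need : PySem.Dict String Int) (hnd : need.keys.Nodup)
    (cnt : PySem.Dict String Int) (sat : Int) (p : String) (w' : List String)
    (hc : ∀ x, cnt.getD x 0 = ((p :: w').count x : Int)) (hs : sat = pvSatOf need (p :: w')) :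
    (∀ x, (pvRem need (cnt, sat) p).1.getD x 0 = (w'.count x : Int)) ∧
      (pvRem need (cnt, sat) p).2 = pvSatOf need w' := by
  have hndi : (need.items.map Prod.fst).Nodup := hnd
  have hcp : cnt.getD p 0 = (w'.count p : Int) + 1 := by
    rw [hc p]; simp
  have hkey := pv_countP_add_one (fun x => (w'.count x : Int)) p need.items hndi
  have hsat : pvSatOf need (p :: w') = pvSatOf need w'
      + (if (p, (w'.count p : Int) + 1) ∈ need.items then 1 else 0) := by
    rw [pv_satOf_cons]
    unfold pvSatOf
    rw [hkey]
    push_cast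
    split_ifs <;> simp
  constructor
  · intro x
    unfold pvRem
    dsimp only
    rw [PySem.Dict.getD_insert]
    by_cases h : x = p
    · subst h; rw [if_pos rfl, hcp]; ring
    · rw [if_neg h, hc x]
      have : ¬ (p = x) := fun hh => h hh.symm
      simp [this]
  · unfold pvRem
    cases hg : need.get? p with
    | none =>
      have hnm : (p, (w'.count p : Int) + 1) ∉ need.items := by
        intro hm
        have := PySem.Dict.mem_keys_of_mem_items need hm
        rw [(PySem.Dict.get?_eq_none_iff_not_mem_keys need p)] at hg
        exact hg this
      dsimp only
      rw [hs, hsat, if_neg hnm]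
      simp
    | some q =>
      by_cases hif : cnt.getD p 0 = q ∧ 0 < q
      · have hm : (p, (w'.count p : Int) + 1) ∈ need.items := by
          have hq : q = (w'.count p : Int) + 1 := by rw [← hif.1, hcp]
          rw [← hq]
          exact (PySem.Dict.get?_eq_some_iff_mem_items need p q hnd).mp hg
        dsimp only
        rw [if_pos hif, hs, hsat, if_pos hm]
        ring
      · have hnm : (p, (w'.count p : Int) + 1) ∉ need.items := by
          intro hm
          have h2 := PySem.Dict.get?_of_mem_items need hm hnd
          rw [hg] at h2
          have hq : q = (w'.count p : Int) + 1 := by injection h2 with h3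
          apply hif
          constructor
          · rw [hcp, hq]
          · have h0 : (0:Int) ≤ (w'.count p : Int) := Int.natCast_nonneg _
            omega
        dsimp only
        rw [if_neg hif, hs, hsat, if_neg hnm]
        simp

lemma pv_foldl_add (need : PySem.Dict String Int) (hnd : need.keys.Nodup) :
    ∀ (l w : List String) (cnt : PySem.Dict String Int) (sat : Int),
      (∀ x, cnt.getD x 0 = (w.count x : Int)) → sat = pvSatOf need w →
      (∀ x, (l.foldl (pvAdd need) (cnt, sat)).1.getD x 0 = ((w ++ l).count x : Int)) ∧
        (l.foldl (pvAdd need) (cnt, sat)).2 = pvSatOf need (w ++ l) := by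
  intro l
  induction l with
  | nil => intro w cnt sat hc hs; simpa using ⟨hc, hs⟩
  | cons p t ih =>
    intro w cnt sat hc hs
    obtain ⟨h1, h2⟩ := pv_bAdd need hnd cnt sat w p hc hs
    have := ih (w ++ [p]) (pvAdd need (cnt, sat) p).1 (pvAdd need (cnt, sat) p).2 h1 h2
    simpa using this

lemma pv_sat_eq_target (need : PySem.Dict String Int) (w : List String) :
    (pvSatOf need w = (PySem.Dict.size need : Int)) ↔ pvGood need w = true := by
  unfold pvSatOf pvGood
  rw [Int.natCast_inj]
  rw [show PySem.Dict.size need = need.items.length from rfl]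
  rw [List.countP_eq_length, List.all_eq_true]

lemma pv_loop (need : PySem.Dict String Int) (hnd : need.keys.Nodup) :
    ∀ (v : List String) (cnt : PySem.Dict String Int) (sat date : Int),
      (∀ x, cnt.getD x 0 = ((v.take 10).count x : Int)) → sat = pvSatOf need (v.take 10) →
      (((v.drop 10).zip v).foldl (pvStep need (PySem.Dict.size need)) ((cnt, sat), date)).2
        = date + (pvWins need v : Int) := by
  intro v
  induction v with
  | nil => intro cnt sat date hc hs; simp [pvWins]
  | cons a t ih =>
    intro cnt sat date hc hs
    by_cases hlen : t.length < 10
    · have hd : (a :: t).drop 10 = [] := by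
        apply List.drop_eq_nil_of_le
        simp; omega
      have hw : pvWins need (a :: t) = 0 := by
        unfold pvWins
        have : (a :: t).length - 10 = 0 := by simp; omega
        rw [this]
        simp
      rw [hd, hw]
      simp
    · rw [not_lt] at hlen
      have h9 : 9 < t.length := by omega
      have hdrop : (a :: t).drop 10 = t[9] :: t.drop 10 := by
        rw [List.drop_succ_cons]
        exact List.drop_eq_getElem_cons h9
      rw [hdrop, List.zip_cons_cons, List.foldl_cons]
      -- one step: add t[9], remove a
      have htake : (a :: t).take 10 = a :: t.take 9 := rfl
      have htake10 : (a :: t).take 10 ++ [t[9]] = a :: t.take 10 := by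
        rw [htake]
        simp [List.take_add_one, h9]
      obtain ⟨h1, h2⟩ := pv_bAdd need hnd cnt sat ((a :: t).take 10) t[9] hc hs
      rw [htake10] at h1 h2
      obtain ⟨h3, h4⟩ := pv_bRem need hnd (pvAdd need (cnt, sat) t[9]).1 (pvAdd need (cnt, sat) t[9]).2 a (t.take 10) h1 h2
      have hstep : pvStep need (PySem.Dict.size need) ((cnt, sat), date) (t[9], a)
          = ((pvRem need (pvAdd need (cnt, sat) t[9]) a),
             if pvGood need (t.take 10) = true then date + 1 else date) := by
        unfold pvStep
        dsimp only
        congr 1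
        rw [h4]
        by_cases hg : pvGood need (t.take 10) = true
        · rw [if_pos ((pv_sat_eq_target need _).mpr hg), if_pos hg]
        · rw [if_neg (fun h => hg ((pv_sat_eq_target need _).mp h)), if_neg hg]
      have hrem_eta : pvRem need (pvAdd need (cnt, sat) t[9]) a
          = ((pvRem need (pvAdd need (cnt, sat) t[9]) a).1, (pvRem need (pvAdd need (cnt, sat) t[9]) a).2) := rfl
      have hadd_eta : pvAdd need (cnt, sat) t[9] = ((pvAdd need (cnt, sat) t[9]).1, (pvAdd need (cnt, sat) t[9]).2) := rfl
      rw [hstep, hrem_eta]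
      rw [hadd_eta] at h3 h4
      rw [ih _ _ _ h3 h4]
      have hwins : (pvWins need (a :: t) : Int)
          = (if pvGood need (t.take 10) = true then 1 else 0) + (pvWins need t : Int) := by
        unfold pvWins
        have hl : (a :: t).length - 10 = (t.length - 10) + 1 := by simp; omega
        rw [hl, List.range_succ_eq_map, List.countP_cons, List.countP_map]
        have hj0 : ((a :: t).drop (0 + 1)).take 10 = t.take 10 := rfl
        rw [hj0]
        have hcomp : ∀ j, ((fun j => pvGood need (((a :: t).drop (j + 1)).take 10)) ∘ Nat.succ) j
            = (fun j => pvGood need ((t.drop (j + 1)).take 10)) j := by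
          intro j
          simp [Function.comp, List.drop_succ_cons]
        rw [List.countP_congr (fun j _ => by rw [hcomp j])]
        push_cast
        split_ifs <;> ring
      rw [hwins]
      split_ifs <;> ring

lemma pv_currentA (L : List String) :
    ∀ (b a : Nat), a + b ≤ L.length → ∀ (cur : PySem.Dict String Int),
    ((PySem.List.pyRange (a : Int) ((a : Int) + (b : Int)) 1).foldl
      (fun cur day =>
        let product := PySem.List.pyGetD L day ""
        if cur.contains product then cur.insert product (cur.getD product 0 + 1)
        else cur.insert product 1) cur)
    = (((L.drop a).take b).foldl
        (fun cur product =>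
          if cur.contains product then cur.insert product (cur.getD product 0 + 1)
          else cur.insert product 1) cur) := by
  intro b
  induction b with
  | zero =>
    intro a _ cur
    rw [show ((a:Int) + (0:Nat) : Int) = (a:Int) by simp]
    rw [PySem.List.pyRange_one_eq_nil (le_refl _)]
    simp
  | succ b ih =>
    intro a hab cur
    have hb : (a:Int) + ((b:Nat) + 1 : Nat) = ((a:Int) + (b:Int)) + 1 := by push_cast; ring
    rw [hb, PySem.List.pyRange_one_succ_right (by omega), List.foldl_append]
    rw [ih a (by omega) cur]
    have hget : PySem.List.pyGetD L ((a:Int) + (b:Int)) "" = L[a + b]'(by omega) := by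
      rw [show ((a:Int) + (b:Int)) = ((a + b : Nat) : Int) by push_cast; ring]
      rw [PySem.List.pyGetD_natCast, List.getD_eq_getElem _ _ (by omega)]
    have htk : (L.drop a).take (b + 1) = (L.drop a).take b ++ [L[a + b]'(by omega)] := by
      rw [List.take_add_one]
      have hlt : b < (L.drop a).length := by simp; omega
      rw [List.getElem?_eq_getElem hlt]
      simp [List.getElem_drop]
    rw [htk, List.foldl_append]
    simp only [List.foldl_cons, List.foldl_nil, hget]

lemma pv_sat0 (need : PySem.Dict String Int) :
    ((need.values.filter (fun q => decide (q ≤ 0))).length : Int) = pvSatOf need [] := by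
  unfold pvSatOf
  congr 1
  rw [← List.countP_eq_length_filter]
  rw [show need.values = need.items.map Prod.snd from rfl, List.countP_map]
  apply List.countP_congr
  intro pq _
  simp

lemma pv_solutionA (want : List String) (number : List Int) (discount : List String) :
    solution want number discount
      = ((List.range ((PySem.List.len discount - 9).toNat)).countP
          (fun k => pvGood (pvNeed want number) ((discount.drop k).take 10)) : Int) := by
  unfold solution
  dsimp only
  rw [PySem.List.pyRange_one, List.foldl_map]
  rw [PySem.List.foldl_congr_mem _ _
    (fun date k => if pvGood (pvNeed want number) ((discount.drop k).take 10) then date + 1 else date) _ ?_]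
  · rw [PySem.List.foldl_if_add_one]
    simp
  · intro date k hk
    rw [List.mem_range] at hk
    have hlen : PySem.List.len discount = (discount.length : Int) := PySem.List.len_eq discount
    have hb : k + 10 ≤ discount.length := by
      rw [hlen] at hk
      omega
    dsimp only
    have h0 : (0 + (k : Int)) = ((k : Nat) : Int) := by ring
    rw [h0]
    rw [show ((k : Int) + 10) = ((k : Int) + ((10 : Nat) : Int)) from rfl]
    rw [pv_currentA discount 10 k hb PySem.Dict.empty]
    have hfun : (fun (pq : String × Int) =>
        !decide ((((discount.drop k).take 10).foldl (fun cur product =>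
          if cur.contains product then cur.insert product (cur.getD product 0 + 1)
          else cur.insert product 1) (PySem.Dict.empty : PySem.Dict String Int)).getD pq.1 0 < pq.2))
        = (fun (pq : String × Int) => decide (pq.2 ≤ (((discount.drop k).take 10).count pq.1 : Int))) := by
      funext pq
      rw [pv_currentA_getD, ← decide_not, decide_eq_decide]
      omega
    rw [hfun]
    rfl

-- ===== VERDICT (by name: the statement is the Claim_ definition above) =====
theorem solution_spec : Claim_equal_solution := by
  intro want number discount _
  unfold Spec_solution
  rw [pv_solutionA]
  unfold solution_alt
  dsimp only
  have hnd : (pvNeed want number).keys.Nodup := by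
    unfold pvNeed
    exact PySem.Dict.nodup_keys_foldl_insert_key _ Prod.fst (fun _ pq => pq.2) _ PySem.Dict.nodup_keys_empty
  have hlen : PySem.List.len discount = (discount.length : Int) := PySem.List.len_eq discount
  by_cases h10 : PySem.List.len discount < 10
  · rw [if_pos h10]
    have : (PySem.List.len discount - 9).toNat = 0 := by omega
    rw [this]
    simp
  · rw [if_neg h10]
    have hn : 10 ≤ discount.length := by rw [hlen] at h10; omega
    rw [show (10 : Int) = ((10 : Nat) : Int) from rfl,
        PySem.List.slice_to_natCast, PySem.List.slice_from_natCast]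
    obtain ⟨h1, h2⟩ := pv_foldl_add (pvNeed want number) hnd (discount.take 10) []
      PySem.Dict.empty ((((pvNeed want number).values.filter (fun q => decide (q ≤ 0))).length : Int))
      (by intro x; simp [PySem.Dict.getD_empty]) (pv_sat0 _)
    simp only [List.nil_append] at h1 h2
    set st0 := ((discount.take 10).foldl (pvAdd (pvNeed want number))
      (PySem.Dict.empty, (((pvNeed want number).values.filter (fun q => decide (q ≤ 0))).length : Int)))
    have heta : st0 = (st0.1, st0.2) := rfl
    rw [heta]
    rw [pv_loop (pvNeed want number) hnd discount st0.1 st0.2 _ h1 h2]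
    have hdate0 : (if st0.2 = ((PySem.Dict.size (pvNeed want number) : Nat) : Int) then (1:Int) else 0)
        = (if pvGood (pvNeed want number) (discount.take 10) then (1:Int) else 0) := by
      rw [h2]
      by_cases hg : pvGood (pvNeed want number) (discount.take 10) = true
      · rw [if_pos ((pv_sat_eq_target _ _).mpr hg), if_pos hg]
      · rw [if_neg (fun h => hg ((pv_sat_eq_target _ _).mp h)), if_neg hg]
    rw [hdate0]
    have hm : (PySem.List.len discount - 9).toNat = (discount.length - 10) + 1 := by omega
    rw [hm, List.range_succ_eq_map, List.countP_cons, List.countP_map]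
    have hc0 : ∀ j, ((fun k => pvGood (pvNeed want number) ((discount.drop k).take 10)) ∘ Nat.succ) j
        = (fun j => pvGood (pvNeed want number) ((discount.drop (j + 1)).take 10)) j := fun j => rfl
    rw [List.countP_congr (fun j _ => by rw [hc0 j])]
    unfold pvWins
    simp only [List.drop_zero]
    push_cast
    split_ifs <;> ring
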